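-- pv_equiv track=rewrite | github.com/mehari123/-Competitive-Programming | 1053-previous-permutation-with-one-swap/1053-previous-permutation-with-one-swap.py | prevPermOpt1
-- ===== SOURCE A (Python) =====
-- from typing import List
--
-- def prevPermOpt1(arr: List[int]) -> List[int]:
--     n = len(arr)
--     min_ = []
--     index = []
--     min_.append(arr[-1])
--     index.append(n-1)
--
--     for i in range(n-1,-1,-1):
--
--         if min_[-1] < arr[i]:
--
--             while  min_ and min_[-1] < arr[i]:
--
--                 min_.pop()
--                 inde = index.pop()
--
--             arr[inde],arr[i] = arr[i],arr[inde]
--             return arr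
--
--         if min_[-1] > arr[i]:
--
--             min_.append(arr[i])
--             index.append(i)
--
--         if min_[-1] == arr[i]:
--
--             min_[-1] = arr[i]
--             index[-1] = i
--
--
--     return arr
-- ===== SOURCE B (Python) =====
-- from typing import List
--
-- def prevPermOpt1(arr: List[int]) -> List[int]:
--     n = len(arr)
--     i = n - 2
--     while i >= 0 and arr[i] <= arr[i + 1]:
--         i -= 1
--     if i < 0:
--         return arr
--     best = i + 1
--     for j in range(i + 2, n):
--         if arr[i] > arr[j] > arr[best]:
--             best = j
--     arr[i], arr[best] = arr[best], arr[i]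
--     return arr
-- ===== Notes on version B (the rewrite author's own statement) =====
-- stated objective: simpler
-- what changed: Replaced A's right-to-left monotonic stack of suffix minima (two parallel lists with a pop loop) by the standard two-scan solution: find the rightmost descent i, then one forward scan over the suffix tracking the leftmost index of the largest value below arr[i], and swap.
import Mathlib
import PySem

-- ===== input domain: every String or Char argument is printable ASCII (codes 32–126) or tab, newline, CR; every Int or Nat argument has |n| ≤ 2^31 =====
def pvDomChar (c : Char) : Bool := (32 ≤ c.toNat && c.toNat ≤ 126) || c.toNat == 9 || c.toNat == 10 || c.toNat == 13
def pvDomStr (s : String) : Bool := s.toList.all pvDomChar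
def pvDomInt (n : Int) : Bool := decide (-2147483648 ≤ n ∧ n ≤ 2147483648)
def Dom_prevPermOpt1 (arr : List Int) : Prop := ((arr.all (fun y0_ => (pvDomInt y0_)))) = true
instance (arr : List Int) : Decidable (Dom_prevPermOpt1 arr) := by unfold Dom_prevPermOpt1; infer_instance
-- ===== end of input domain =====

-- B replaces A's monotonic stack of suffix minima by two plain scans (rightmost descent,
-- then leftmost index of the largest suffix value below it): simpler, same O(n) cost.
-- Both Pythons mutate arr in place and return the same object; the equivalence proved
-- here is about the returned list value.

-- ===== PORT A =====
-- the `while min_ and min_[-1] < arr[i]` pop loop; returns the last popped index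
-- (Python's `inde`); `none` = the loop never popped (then Python's `inde` would be
-- unbound, which never happens on the path A takes).
def pvPopInde (mins : List Int) (idxs : List Nat) (x : Int) : Option Nat :=
  match mins, idxs with
  | m :: ms, j :: js => if m < x then some ((pvPopInde ms js x).getD j) else none
  | _, _ => none

-- the two sequential `if`s of A's loop body on the non-return path
def pvStepStack (mins : List Int) (idxs : List Nat) (x : Int) (i : Nat) : List Int × List Nat :=
  let s1 := if x < mins.headD 0 then (x :: mins, i :: idxs) else (mins, idxs)
  if s1.1.headD 0 = x then (x :: s1.1.tail, i :: s1.2.tail) else s1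

-- A's `for i in range(n-1,-1,-1)` loop; indices stored in `index` are the natural
-- numbers n-1, n-2, …; arr accesses are in range on every path A takes, so List.getD
-- is exact here.
def pvLoopA (arr : List Int) (mins : List Int) (idxs : List Nat) (i : Nat) : List Int :=
  if mins.headD 0 < arr.getD i 0 then
    -- arr[inde], arr[i] = arr[i], arr[inde]; return arr
    (arr.set ((pvPopInde mins idxs (arr.getD i 0)).getD 0) (arr.getD i 0)).set i
      (arr.getD ((pvPopInde mins idxs (arr.getD i 0)).getD 0) 0)
  else
    match i with
    | 0 => arr
    | i' + 1 => pvLoopA arr (pvStepStack mins idxs (arr.getD (i'+1) 0) (i'+1)).1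
        (pvStepStack mins idxs (arr.getD (i'+1) 0) (i'+1)).2 i'

def prevPermOpt1 (arr : List Int) : List Int :=
  match PySem.List.pyGet? arr (-1) with
  | none => []    -- Python raises IndexError here (empty arr); excluded by Pre_
  | some last => pvLoopA arr [last] [arr.length - 1] (arr.length - 1)

-- ===== PORT B =====
-- B's `while i >= 0 and arr[i] <= arr[i+1]: i -= 1`; `none` = i went below 0
def pvBDesc (arr : List Int) : Nat → Option Nat
  | 0 => if arr.getD 0 0 ≤ arr.getD 1 0 then none else some 0
  | i + 1 => if arr.getD (i+1) 0 ≤ arr.getD (i+2) 0 then pvBDesc arr i else some (i+1)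

def prevPermOpt1_alt (arr : List Int) : List Int :=
  if arr.length < 2 then arr       -- i = n-2 < 0: the while loop never runs
  else match pvBDesc arr (arr.length - 2) with
    | none => arr
    | some i =>
      (arr.set i (arr.getD ((List.range' (i+2) (arr.length - (i+2))).foldl
          (fun best j => if arr.getD i 0 > arr.getD j 0 ∧ arr.getD j 0 > arr.getD best 0 then j else best)
          (i+1)) 0)).set
        ((List.range' (i+2) (arr.length - (i+2))).foldl
          (fun best j => if arr.getD i 0 > arr.getD j 0 ∧ arr.getD j 0 > arr.getD best 0 then j else best)
          (i+1)) (arr.getD i 0)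

-- ===== PRECONDITION & SPEC =====
-- A reads the last element before its loop, so it raises IndexError exactly on the empty list;
-- B returns the empty list unchanged there.
def Pre_prevPermOpt1 (arr : List Int) : Prop := arr ≠ []
instance (arr : List Int) : Decidable (Pre_prevPermOpt1 arr) := by unfold Pre_prevPermOpt1; infer_instance
def pvWitness_prevPermOpt1 : List Int := [3, 1, 1, 2]

def Spec_prevPermOpt1 (arr : List Int) (out : List Int) : Prop := out = prevPermOpt1_alt arr
instance (arr : List Int) (out : List Int) : Decidable (Spec_prevPermOpt1 arr out) := by unfold Spec_prevPermOpt1; infer_instance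

-- ===== CLAIM (what is proved, stated in full; the proofs are below) =====
def Claim_equal_prevPermOpt1 : Prop := ∀ (arr : List Int), Dom_prevPermOpt1 arr → Pre_prevPermOpt1 arr → Spec_prevPermOpt1 arr (prevPermOpt1 arr)

-- ===== LEMMAS AND PROOFS =====

-- arr is non-decreasing from index k on
def pvSorted (arr : List Int) (k : Nat) : Prop :=
  ∀ j, k ≤ j → j + 2 ≤ arr.length → arr.getD j 0 ≤ arr.getD (j+1) 0

-- the "record" indices of arr on [k, m): k and every j with arr[j-1] < arr[j]
def pvRecs (arr : List Int) (k m : Nat) : List Nat :=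
  k :: (List.range' (k+1) (m - (k+1))).filter (fun j => decide (arr.getD (j-1) 0 < arr.getD j 0))

-- the characterisation both programs' chosen swap index satisfies
def pvIsBest (arr : List Int) (i j : Nat) : Prop :=
  i + 1 ≤ j ∧ j + 1 ≤ arr.length ∧ arr.getD j 0 < arr.getD i 0 ∧
  (∀ k, i + 1 ≤ k → k < j → arr.getD k 0 < arr.getD j 0) ∧
  (∀ k, j < k → k + 1 ≤ arr.length → arr.getD k 0 < arr.getD i 0 → arr.getD k 0 ≤ arr.getD j 0)

theorem pvMono (arr : List Int) (s : Nat) (h : pvSorted arr s) :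
    ∀ p q, s ≤ p → p ≤ q → q + 1 ≤ arr.length → arr.getD p 0 ≤ arr.getD q 0 := by
  intro p q hsp hpq
  induction q, hpq using Nat.le_induction with
  | base => intro _; exact le_refl _
  | succ n hn ih =>
    intro hlen
    exact le_trans (ih (by omega)) (h n (by omega) (by omega))

theorem pvIsBest_unique (arr : List Int) (i p q : Nat)
    (hp : pvIsBest arr i p) (hq : pvIsBest arr i q) : p = q := by
  obtain ⟨hp1, hp2, hp3, hp4, hp5⟩ := hp
  obtain ⟨hq1, hq2, hq3, hq4, hq5⟩ := hq
  rcases Nat.lt_trichotomy p q with h | h | h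
  · have h1 := hp5 q h hq2 hq3
    have h2 := hq4 p hp1 h
    omega
  · exact h
  · have h1 := hq5 p h hp2 hp3
    have h2 := hp4 q hq1 h
    omega

theorem pvBDesc_none (arr : List Int) (h : pvSorted arr 0) :
    ∀ k, k + 2 ≤ arr.length → pvBDesc arr k = none := by
  intro k
  induction k with
  | zero => intro hk; simp only [pvBDesc, if_pos (h 0 (by omega) hk)]
  | succ k ih =>
    intro hk
    simp only [pvBDesc, if_pos (h (k+1) (by omega) hk)]
    exact ih (by omega)

theorem pvBDesc_some (arr : List Int) (i : Nat) (h : pvSorted arr (i+1))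
    (hd : arr.getD (i+1) 0 < arr.getD i 0) :
    ∀ k, i ≤ k → k + 2 ≤ arr.length → pvBDesc arr k = some i := by
  intro k hik
  induction k, hik using Nat.le_induction with
  | base =>
    intro hlen
    cases i with
    | zero => simp only [pvBDesc, if_neg (not_le.mpr hd)]
    | succ i' => simp only [pvBDesc, if_neg (not_le.mpr hd)]
  | succ k hk ih =>
    intro hlen
    simp only [pvBDesc, if_pos (h (k+1) (by omega) hlen)]
    exact ih (by omega)

theorem pvFold_inv (arr : List Int) (i : Nat) (h : pvSorted arr (i+1))
    (hd : arr.getD (i+1) 0 < arr.getD i 0) :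
    ∀ L, i + 2 + L ≤ arr.length →
      i + 1 ≤ ((List.range' (i+2) L).foldl
        (fun best j => if arr.getD i 0 > arr.getD j 0 ∧ arr.getD j 0 > arr.getD best 0 then j else best)
        (i+1)) ∧
      ((List.range' (i+2) L).foldl
        (fun best j => if arr.getD i 0 > arr.getD j 0 ∧ arr.getD j 0 > arr.getD best 0 then j else best)
        (i+1)) + 1 ≤ i + 2 + L ∧
      arr.getD ((List.range' (i+2) L).foldl
        (fun best j => if arr.getD i 0 > arr.getD j 0 ∧ arr.getD j 0 > arr.getD best 0 then j else best)
        (i+1)) 0 < arr.getD i 0 ∧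
      (∀ k, i + 1 ≤ k → k < ((List.range' (i+2) L).foldl
        (fun best j => if arr.getD i 0 > arr.getD j 0 ∧ arr.getD j 0 > arr.getD best 0 then j else best)
        (i+1)) → arr.getD k 0 < arr.getD ((List.range' (i+2) L).foldl
        (fun best j => if arr.getD i 0 > arr.getD j 0 ∧ arr.getD j 0 > arr.getD best 0 then j else best)
        (i+1)) 0) ∧
      (∀ k, ((List.range' (i+2) L).foldl
        (fun best j => if arr.getD i 0 > arr.getD j 0 ∧ arr.getD j 0 > arr.getD best 0 then j else best)
        (i+1)) < k → k < i + 2 + L → arr.getD k 0 < arr.getD i 0 → arr.getD k 0 ≤ arr.getD ((List.range' (i+2) L).foldl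
        (fun best j => if arr.getD i 0 > arr.getD j 0 ∧ arr.getD j 0 > arr.getD best 0 then j else best)
        (i+1)) 0) := by
  intro L
  induction L with
  | zero =>
    intro _
    simp only [List.range'_zero, List.foldl_nil]
    exact ⟨le_refl _, by omega, hd, fun k h1 h2 => by omega, fun k h1 h2 _ => by omega⟩
  | succ L ih =>
    intro hL
    obtain ⟨ih1, ih2, ih3, ih4, ih5⟩ := ih (by omega)
    rw [List.range'_1_concat, List.foldl_append, List.foldl_cons, List.foldl_nil]
    set b := ((List.range' (i+2) L).foldl
        (fun best j => if arr.getD i 0 > arr.getD j 0 ∧ arr.getD j 0 > arr.getD best 0 then j else best)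
        (i+1)) with hb
    by_cases hc : arr.getD i 0 > arr.getD (i+2+L) 0 ∧ arr.getD (i+2+L) 0 > arr.getD b 0
    · rw [if_pos hc]
      refine ⟨by omega, by omega, hc.1, ?_, ?_⟩
      · intro k hk1 hk2
        rcases Nat.lt_trichotomy k b with hkb | hkb | hkb
        · exact lt_trans (ih4 k hk1 hkb) hc.2
        · rw [hkb]; exact hc.2
        · have hkle : arr.getD k 0 ≤ arr.getD (i+2+L) 0 :=
            pvMono arr (i+1) h k (i+2+L) hk1 (by omega) (by omega)
          exact lt_of_le_of_lt (ih5 k hkb (by omega) (lt_of_le_of_lt hkle hc.1)) hc.2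
      · intro k h1 h2 _; omega
    · rw [if_neg hc]
      push Not at hc
      refine ⟨ih1, by omega, ih3, ih4, ?_⟩
      intro k hk1 hk2 hk3
      rcases Nat.lt_or_ge k (i+2+L) with hkL | hkL
      · exact ih5 k hk1 hkL hk3
      · have hkeq : k = i+2+L := by omega
        rw [hkeq] at hk3 ⊢
        exact hc hk3

theorem pvFold_best (arr : List Int) (i : Nat) (h : pvSorted arr (i+1))
    (hd : arr.getD (i+1) 0 < arr.getD i 0) (hn : i + 2 ≤ arr.length) :
    pvIsBest arr i ((List.range' (i+2) (arr.length - (i+2))).foldl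
      (fun best j => if arr.getD i 0 > arr.getD j 0 ∧ arr.getD j 0 > arr.getD best 0 then j else best)
      (i+1)) := by
  obtain ⟨h1, h2, h3, h4, h5⟩ := pvFold_inv arr i h hd (arr.length - (i+2)) (by omega)
  have hlen : i + 2 + (arr.length - (i+2)) = arr.length := by omega
  rw [hlen] at h2 h5
  exact ⟨h1, by omega, h3, h4, fun k hk1 hk2 hk3 => h5 k hk1 (by omega) hk3⟩

theorem pvLast_max : ∀ (l : List Nat), l.Pairwise (· < ·) → ∀ y, y ∈ l → ∀ z, l.getLast? = some z → y ≤ z := by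
  intro l
  induction l with
  | nil => intro _ y hy; simp at hy
  | cons a t ih =>
    intro hp y hy z hz
    cases t with
    | nil => simp at hy hz; omega
    | cons b t' =>
      rw [List.getLast?_cons_cons] at hz
      rcases List.mem_cons.mp hy with rfl | hy'
      · have hz' : z ∈ b :: t' := List.mem_of_getLast? hz
        have := (List.pairwise_cons.mp hp).1 z hz'
        omega
      · exact ih (List.pairwise_cons.mp hp).2 y hy' z hz

theorem pvPopInde_eq (arr : List Int) (x : Int) :
    ∀ rs : List Nat, pvPopInde (rs.map (fun k => arr.getD k 0)) rs x
      = (rs.takeWhile (fun j => decide (arr.getD j 0 < x))).getLast? := by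
  intro rs
  induction rs with
  | nil => simp [pvPopInde]
  | cons r rest ih =>
    by_cases hr : arr.getD r 0 < x
    · simp only [List.map_cons, pvPopInde, if_pos hr, ih,
        List.takeWhile_cons_of_pos (p := fun j => decide (arr.getD j 0 < x)) (by simpa using hr),
        List.getLast?_cons]
    · simp only [List.map_cons, pvPopInde, if_neg hr,
        List.takeWhile_cons_of_neg (p := fun j => decide (arr.getD j 0 < x)) (by simpa using hr),
        List.getLast?_nil]

theorem pvRecs_mem (arr : List Int) (k m j : Nat) :
    j ∈ pvRecs arr k m ↔ (j = k ∨ (k + 1 ≤ j ∧ j + 1 ≤ m ∧ arr.getD (j-1) 0 < arr.getD j 0)) := by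
  simp only [pvRecs, List.mem_cons, List.mem_filter, List.mem_range'_1, decide_eq_true_eq]
  constructor
  · rintro (rfl | ⟨⟨h1, h2⟩, h3⟩)
    · exact Or.inl rfl
    · exact Or.inr ⟨h1, by omega, h3⟩
  · rintro (rfl | ⟨h1, h2, h3⟩)
    · exact Or.inl rfl
    · exact Or.inr ⟨⟨h1, by omega⟩, h3⟩

theorem pvRecs_pairwise (arr : List Int) (k m : Nat) : (pvRecs arr k m).Pairwise (· < ·) := by
  unfold pvRecs
  refine List.pairwise_cons.mpr ⟨?_, List.Pairwise.filter _ (List.pairwise_lt_range' ..)⟩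
  intro y hy
  have h1 := List.mem_range'_1.mp (List.mem_filter.mp hy).1
  omega

theorem pvFlat (arr : List Int) (s r : Nat) (h : pvSorted arr s) (hsr : s ≤ r) (K : Nat)
    (hK : K + 1 ≤ arr.length)
    (hnr : ∀ j, r < j → j ≤ K → ¬ arr.getD (j-1) 0 < arr.getD j 0) :
    ∀ k, r ≤ k → k ≤ K → arr.getD k 0 = arr.getD r 0 := by
  intro k hrk
  induction k, hrk using Nat.le_induction with
  | base => intro _; rfl
  | succ n hn ih =>
    intro hnK
    have h1 := hnr (n+1) (by omega) hnK
    have h2 := h n (by omega) (by omega)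
    have h3 := ih (by omega)
    simp only [Nat.add_sub_cancel] at h1
    omega

theorem pvPop_best (arr : List Int) (i : Nat) (h : pvSorted arr (i+1))
    (hd : arr.getD (i+1) 0 < arr.getD i 0) (hn : i + 2 ≤ arr.length) :
    pvIsBest arr i ((pvPopInde ((pvRecs arr (i+1) arr.length).map (fun k => arr.getD k 0))
      (pvRecs arr (i+1) arr.length) (arr.getD i 0)).getD 0) := by
  rw [pvPopInde_eq]
  set p : Nat → Bool := fun j => decide (arr.getD j 0 < arr.getD i 0) with hp
  set R : List Nat := pvRecs arr (i+1) arr.length with hR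
  set T : List Nat := R.takeWhile p with hT
  have hRcons : R = (i+1) :: ((List.range' (i+1+1) (arr.length - (i+1+1))).filter
      (fun j => decide (arr.getD (j-1) 0 < arr.getD j 0))) := rfl
  have hTne : T ≠ [] := by
    rw [hT, hRcons, List.takeWhile_cons_of_pos (by simpa [hp] using hd)]
    simp
  obtain ⟨z, hz⟩ := Option.isSome_iff_exists.mp (List.getLast?_isSome.mpr hTne)
  rw [hz, Option.getD_some]
  have hzT : z ∈ T := List.mem_of_getLast? hz
  have hzR : z ∈ R := (List.takeWhile_sublist p).mem hzT
  have hzp : arr.getD z 0 < arr.getD i 0 := by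
    have := List.mem_takeWhile_imp hzT
    simpa [hp] using this
  have hzmem := (pvRecs_mem arr (i+1) arr.length z).mp hzR
  have hz1 : i + 1 ≤ z := by rcases hzmem with rfl | ⟨h1, _, _⟩ <;> omega
  have hz2 : z + 1 ≤ arr.length := by rcases hzmem with rfl | ⟨_, h2, _⟩ <;> omega
  have hpwR : (T ++ R.dropWhile p).Pairwise (· < ·) := by
    rw [hT, List.takeWhile_append_dropWhile]
    exact pvRecs_pairwise arr (i+1) arr.length
  obtain ⟨pwT, pwD, hcross⟩ := List.pairwise_append.mp hpwR
  have hTD : R = T ++ R.dropWhile p := by rw [hT, List.takeWhile_append_dropWhile]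
  refine ⟨hz1, hz2, hzp, ?_, ?_⟩
  · intro k hk1 hk2
    rcases hzmem with rfl | ⟨hr1, hr2, hr3⟩
    · omega
    · have hkle : arr.getD k 0 ≤ arr.getD (z-1) 0 :=
        pvMono arr (i+1) h k (z-1) hk1 (by omega) (by omega)
      omega
  · intro k hk1 hk2 hk3
    -- no record of arr lies in (z, k]; then arr is constant on [z, k]
    have flat : (∀ j, z < j → j ≤ k → ¬ arr.getD (j-1) 0 < arr.getD j 0) →
        arr.getD k 0 ≤ arr.getD z 0 := by
      intro hnr
      have := pvFlat arr (i+1) z h hz1 k (by omega) hnr k (by omega) (by omega)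
      omega
    cases hD : R.dropWhile p with
    | nil =>
      refine flat ?_
      intro j hj1 hj2 hrecj
      have hjR : j ∈ R := (pvRecs_mem arr (i+1) arr.length j).mpr
        (Or.inr ⟨by omega, by omega, hrecj⟩)
      rcases List.mem_append.mp (hTD ▸ hjR) with hjT | hjD
      · exact absurd (pvLast_max T pwT j hjT z hz) (by omega)
      · rw [hD] at hjD; simp at hjD
    | cons d D' =>
      have hdp : ¬ p d := by
        have h2 := List.head_dropWhile_not p (l := R) (by simp [hD])
        simp only [hD, List.head_cons] at h2
        simp [h2]
      have hdge : arr.getD i 0 ≤ arr.getD d 0 := by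
        simpa [hp] using hdp
      have hdR : d ∈ R := by
        rw [hTD, hD]
        exact List.mem_append_right _ (List.mem_cons_self)
      have hd1 : i + 1 ≤ d := by
        rcases (pvRecs_mem arr (i+1) arr.length d).mp hdR with rfl | ⟨h1, _, _⟩ <;> omega
      have hkd : k < d := by
        by_contra hcon
        have : arr.getD d 0 ≤ arr.getD k 0 :=
          pvMono arr (i+1) h d k hd1 (by omega) (by omega)
        omega
      refine flat ?_
      intro j hj1 hj2 hrecj
      have hjR : j ∈ R := (pvRecs_mem arr (i+1) arr.length j).mpr
        (Or.inr ⟨by omega, by omega, hrecj⟩)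
      rcases List.mem_append.mp (hTD ▸ hjR) with hjT | hjD
      · exact absurd (pvLast_max T pwT j hjT z hz) (by omega)
      · rw [hD] at hjD pwD
        rcases List.mem_cons.mp hjD with rfl | hjD'
        · omega
        · have := (List.pairwise_cons.mp pwD).1 j hjD'
          omega

theorem pvStep_rec (arr : List Int) (i : Nat) (hn : i + 2 ≤ arr.length)
    (hle : arr.getD i 0 ≤ arr.getD (i+1) 0) :
    pvStepStack ((pvRecs arr (i+1) arr.length).map (fun k => arr.getD k 0))
      (pvRecs arr (i+1) arr.length) (arr.getD i 0) i
    = ((pvRecs arr i arr.length).map (fun k => arr.getD k 0), pvRecs arr i arr.length) := by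
  have e1 : arr.length - (i+1) = (arr.length - (i+2)) + 1 := by omega
  have hRi1 : pvRecs arr (i+1) arr.length
      = (i+1) :: (List.range' (i+2) (arr.length - (i+2))).filter
          (fun j => decide (arr.getD (j-1) 0 < arr.getD j 0)) := rfl
  by_cases hlt : arr.getD i 0 < arr.getD (i+1) 0
  · have hRi : pvRecs arr i arr.length
        = i :: (i+1) :: (List.range' (i+2) (arr.length - (i+2))).filter
            (fun j => decide (arr.getD (j-1) 0 < arr.getD j 0)) := by
      unfold pvRecs
      rw [e1, List.range'_succ, List.filter_cons]
      simp only [Nat.add_sub_cancel, hlt, decide_true, if_true]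
    rw [hRi1, hRi]
    simp only [pvStepStack, List.map_cons, List.headD_cons]
    rw [if_pos hlt]
    simp only [List.headD_cons, List.tail_cons, if_true]
  · have heq : arr.getD i 0 = arr.getD (i+1) 0 := le_antisymm hle (not_lt.mp hlt)
    have hRi : pvRecs arr i arr.length
        = i :: (List.range' (i+2) (arr.length - (i+2))).filter
            (fun j => decide (arr.getD (j-1) 0 < arr.getD j 0)) := by
      unfold pvRecs
      rw [e1, List.range'_succ, List.filter_cons]
      simp only [Nat.add_sub_cancel]
      rw [if_neg (by simpa using hlt)]
    rw [hRi1, hRi]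
    simp only [pvStepStack, List.map_cons, List.headD_cons]
    rw [if_neg hlt]
    simp only [List.headD_cons, List.tail_cons]
    rw [if_pos heq.symm]

theorem pvSorted_ext (arr : List Int) (k : Nat) (h : pvSorted arr (k+1))
    (hle : arr.getD k 0 ≤ arr.getD (k+1) 0) : pvSorted arr k := by
  intro j hj hjlen
  by_cases hjk : j = k
  · rw [hjk]; exact hle
  · exact h j (by omega) hjlen

theorem pvLoopA_trig (arr : List Int) (mins : List Int) (idxs : List Nat) (i : Nat)
    (hc : mins.headD 0 < arr.getD i 0) :
    pvLoopA arr mins idxs i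
    = (arr.set ((pvPopInde mins idxs (arr.getD i 0)).getD 0) (arr.getD i 0)).set i
        (arr.getD ((pvPopInde mins idxs (arr.getD i 0)).getD 0) 0) := by
  rw [pvLoopA.eq_def, if_pos hc]

theorem pvLoopA_zero (arr : List Int) (mins : List Int) (idxs : List Nat)
    (hc : ¬ mins.headD 0 < arr.getD 0 0) : pvLoopA arr mins idxs 0 = arr := by
  rw [pvLoopA.eq_def, if_neg hc]

theorem pvLoopA_succ (arr : List Int) (mins : List Int) (idxs : List Nat) (i' : Nat)
    (hc : ¬ mins.headD 0 < arr.getD (i'+1) 0) :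
    pvLoopA arr mins idxs (i'+1)
    = pvLoopA arr (pvStepStack mins idxs (arr.getD (i'+1) 0) (i'+1)).1
        (pvStepStack mins idxs (arr.getD (i'+1) 0) (i'+1)).2 i' := by
  rw [pvLoopA.eq_def, if_neg hc]

-- A's stack before step i maps a (i+1) at its top
theorem pvHead_recs (arr : List Int) (i : Nat) :
    ((pvRecs arr (i+1) arr.length).map (fun k => arr.getD k 0)).headD 0 = arr.getD (i+1) 0 := rfl

-- on a trigger at index i, A's swap equals B's entire result
theorem pvTrigger (arr : List Int) (i : Nat) (h : pvSorted arr (i+1))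
    (hd : arr.getD (i+1) 0 < arr.getD i 0) (hn : i + 2 ≤ arr.length) :
    (arr.set ((pvPopInde ((pvRecs arr (i+1) arr.length).map (fun k => arr.getD k 0))
        (pvRecs arr (i+1) arr.length) (arr.getD i 0)).getD 0) (arr.getD i 0)).set i
      (arr.getD ((pvPopInde ((pvRecs arr (i+1) arr.length).map (fun k => arr.getD k 0))
        (pvRecs arr (i+1) arr.length) (arr.getD i 0)).getD 0) 0)
    = prevPermOpt1_alt arr := by
  set jA := ((pvPopInde ((pvRecs arr (i+1) arr.length).map (fun k => arr.getD k 0))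
      (pvRecs arr (i+1) arr.length) (arr.getD i 0)).getD 0) with hjA
  have hA : pvIsBest arr i jA := pvPop_best arr i h hd hn
  have hB := pvFold_best arr i h hd hn
  have hEq := pvIsBest_unique arr i jA _ hA hB
  have halt : prevPermOpt1_alt arr
      = (arr.set i (arr.getD ((List.range' (i+2) (arr.length - (i+2))).foldl
          (fun best j => if arr.getD i 0 > arr.getD j 0 ∧ arr.getD j 0 > arr.getD best 0 then j else best)
          (i+1)) 0)).set
        ((List.range' (i+2) (arr.length - (i+2))).foldl
          (fun best j => if arr.getD i 0 > arr.getD j 0 ∧ arr.getD j 0 > arr.getD best 0 then j else best)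
          (i+1)) (arr.getD i 0) := by
    unfold prevPermOpt1_alt
    rw [if_neg (by omega), pvBDesc_some arr i h hd (arr.length - 2) (by omega) (by omega)]
  rw [halt, ← hEq]
  exact List.set_comm _ _ (show jA ≠ i by have := hA.1; omega)

theorem pvMain (arr : List Int) :
    ∀ i, i + 2 ≤ arr.length → pvSorted arr (i+1) →
    pvLoopA arr ((pvRecs arr (i+1) arr.length).map (fun k => arr.getD k 0))
      (pvRecs arr (i+1) arr.length) i = prevPermOpt1_alt arr := by
  intro i
  induction i with
  | zero =>
    intro hn hs
    by_cases hlt : arr.getD (0+1) 0 < arr.getD 0 0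
    · rw [pvLoopA_trig _ _ _ _ (by rw [pvHead_recs]; exact hlt)]
      exact pvTrigger arr 0 hs hlt hn
    · rw [pvLoopA_zero _ _ _ (by rw [pvHead_recs]; exact hlt)]
      have hs0 : pvSorted arr 0 := pvSorted_ext arr 0 hs (not_lt.mp hlt)
      unfold prevPermOpt1_alt
      rw [if_neg (by omega), pvBDesc_none arr hs0 (arr.length - 2) (by omega)]
  | succ i' ih =>
    intro hn hs
    by_cases hlt : arr.getD (i'+1+1) 0 < arr.getD (i'+1) 0
    · rw [pvLoopA_trig _ _ _ _ (by rw [pvHead_recs]; exact hlt)]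
      exact pvTrigger arr (i'+1) hs hlt hn
    · rw [pvLoopA_succ _ _ _ _ (by rw [pvHead_recs]; exact hlt)]
      rw [pvStep_rec arr (i'+1) hn (not_lt.mp hlt)]
      exact ih (by omega) (pvSorted_ext arr (i'+1) hs (not_lt.mp hlt))

-- ===== VERDICT (by name: the statement is the Claim_ definition above) =====
theorem prevPermOpt1_spec : Claim_equal_prevPermOpt1 := by
  intro arr _ hpre
  unfold Spec_prevPermOpt1 prevPermOpt1
  rw [PySem.List.pyGet?_neg_one]
  obtain ⟨z, hz⟩ := Option.isSome_iff_exists.mp (List.getLast?_isSome.mpr hpre)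
  have hlen : 1 ≤ arr.length := by
    cases arr with
    | nil => exact absurd rfl hpre
    | cons a t => simp
  have hzval : z = arr.getD (arr.length - 1) 0 := by
    have hz' := hz
    rw [List.getLast?_eq_getElem?] at hz'
    rw [List.getD_eq_getElem?_getD, hz']
    rfl
  rw [hz]
  by_cases hn2 : arr.length < 2
  · have h1 : arr.length - 1 = 0 := by omega
    rw [h1]
    show pvLoopA arr [z] [0] 0 = prevPermOpt1_alt arr
    rw [pvLoopA_zero _ _ _ (by simp only [List.headD_cons]; rw [hzval, h1]; omega)]
    unfold prevPermOpt1_alt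
    rw [if_pos hn2]
  · have h1 : arr.length - 1 = (arr.length - 2) + 1 := by omega
    rw [h1]
    show pvLoopA arr [z] [arr.length - 2 + 1] (arr.length - 2 + 1) = prevPermOpt1_alt arr
    rw [pvLoopA_succ _ _ _ _ (by simp only [List.headD_cons]; rw [hzval, h1]; omega)]
    have hxz : arr.getD (arr.length - 2 + 1) 0 = z := by rw [hzval, h1]
    rw [hxz]
    have hstep : pvStepStack [z] [arr.length - 2 + 1] z (arr.length - 2 + 1)
        = ([z], [arr.length - 2 + 1]) := by
      simp [pvStepStack]
    rw [hstep]
    have hrecs : pvRecs arr (arr.length - 2 + 1) arr.length = [arr.length - 2 + 1] := by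
      unfold pvRecs
      rw [show arr.length - (arr.length - 2 + 1 + 1) = 0 from by omega, List.range'_zero,
        List.filter_nil]
    have hmap : ([z] : List Int) = (pvRecs arr (arr.length - 2 + 1) arr.length).map
        (fun k => arr.getD k 0) := by
      rw [hrecs, List.map_cons, List.map_nil, hzval, h1]
    rw [hmap, ← hrecs]
    refine pvMain arr (arr.length - 2) (by omega) ?_
    intro j hj hjlen
    omega
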